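-- pv_equiv track=rewrite | github.com/embedded-pro/e-foc | .github/actions/cycle-analysis/analyze_multi.py | _build_collapsible_sections
-- ===== SOURCE A (Python) =====
-- from typing import Any
--
-- def _build_collapsible_sections(
--     analyses: list[dict[str, Any]],
--     budgets: list[str],
--     reports: list[str],
--     target: str,
-- ) -> list[str]:
--     """Return lines shared between the PR comment and the step summary."""
--     lines: list[str] = []
--     for i, (entry, budget, report) in enumerate(zip(analyses, budgets, reports)):
--         label = entry["label"]
--         lines.append(f"### {label} | {target}")
--         lines.append("")
--         lines.append("**CPU Utilization Budget**")
--         lines.append("")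
--         lines.append(budget)
--         lines.append("")
--         lines.append("<details>")
--         lines.append("<summary>Click to expand full details</summary>")
--         lines.append("")
--         lines.append(report)
--         lines.append("")
--         lines.append("</details>")
--         lines.append("")
--         if i < len(analyses) - 1:
--             lines.append("---")
--             lines.append("")
--     return lines
-- ===== SOURCE B (Python) =====
-- def _build_collapsible_sections(
--     analyses,
--     budgets,
--     reports,
--     target,
-- ):
--     """Return lines shared between the PR comment and the step summary."""
--     sections = [
--         [
--             f"### {entry['label']} | {target}",
--             "",
--             "**CPU Utilization Budget**",
--             "",
--             budget,
--             "",
--             "<details>",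
--             "<summary>Click to expand full details</summary>",
--             "",
--             report,
--             "",
--             "</details>",
--             "",
--         ]
--         for entry, budget, report in zip(analyses, budgets, reports)
--     ]
--     if not sections:
--         return []
--     first, *rest = sections
--     return first + [line for block in rest for line in ["---", ""] + block]
-- ===== Notes on version B (the rewrite author's own statement) =====
-- stated objective: simpler
-- what changed: B renders one line-block per section and joins them by prepending the separator block to every section after the first, removing A's enumerate/index look-ahead test; Pre_ excludes only inputs where A raises KeyError (a rendered entry without a 'label' key).
-- intended difference: When analyses is longer than the rendered zip (min(len(budgets), len(reports)) is at least 1 but less than len(analyses)), A's i < len(analyses)-1 test uses the wrong length and appends a dangling trailing '---','' separator; B emits separators only between sections, which is the intended Markdown layout. — e.g. on _build_collapsible_sections([[("label", "app")], [("label", "boot")]], ["ok"], ["r1"], "stm32"): A returns ["### app | stm32", "", "**CPU Utilization Budget**", "", "ok", "", "<details>", "<summary>Click to expand full details…, B returns ["### app | stm32", "", "**CPU Utilization Budget**", "", "ok", "", "<details>", "<summary>Click to expand full details…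
import Mathlib
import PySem

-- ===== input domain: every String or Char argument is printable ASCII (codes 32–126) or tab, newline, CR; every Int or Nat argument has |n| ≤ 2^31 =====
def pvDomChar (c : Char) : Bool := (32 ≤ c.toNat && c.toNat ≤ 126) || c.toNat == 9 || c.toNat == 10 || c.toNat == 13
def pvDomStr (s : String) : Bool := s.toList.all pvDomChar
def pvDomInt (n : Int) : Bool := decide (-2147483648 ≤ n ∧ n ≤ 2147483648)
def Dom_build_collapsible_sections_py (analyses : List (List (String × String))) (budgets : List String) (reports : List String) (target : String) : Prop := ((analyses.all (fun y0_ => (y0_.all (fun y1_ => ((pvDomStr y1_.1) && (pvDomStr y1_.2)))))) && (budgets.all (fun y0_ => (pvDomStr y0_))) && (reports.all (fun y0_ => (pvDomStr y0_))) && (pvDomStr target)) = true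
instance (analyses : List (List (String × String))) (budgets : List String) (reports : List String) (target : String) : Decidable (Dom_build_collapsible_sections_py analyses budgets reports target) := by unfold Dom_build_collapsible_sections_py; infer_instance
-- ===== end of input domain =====

-- B renders one line-block per section and joins them with a separator before every
-- section after the first, removing A's index look-ahead test (objective: simpler;
-- B also drops A's dangling trailing separator on truncated zips, stated as D_ below).

-- ===== PORT A =====
-- A's loop: enumerate(zip(analyses, budgets, reports)), appending 13 lines per entry
-- and a separator when i < len(analyses) - 1.  entry["label"] (KeyError when absent,
-- excluded by Pre_) is first-match lookup; outside Pre_ the port reads "".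
def build_collapsible_sections_py (analyses : List (List (String × String))) (budgets : List String) (reports : List String) (target : String) : List String :=
  (PySem.List.enumerate (analyses.zip (budgets.zip reports)) 0).foldl
    (fun lines x =>
      let i := x.1
      let entry := x.2.1
      let budget := x.2.2.1
      let report := x.2.2.2
      let label := (List.lookup "label" entry).getD ""
      let lines := lines ++ ["### " ++ label ++ " | " ++ target]
      let lines := lines ++ [""]
      let lines := lines ++ ["**CPU Utilization Budget**"]
      let lines := lines ++ [""]
      let lines := lines ++ [budget]
      let lines := lines ++ [""]
      let lines := lines ++ ["<details>"]
      let lines := lines ++ ["<summary>Click to expand full details</summary>"]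
      let lines := lines ++ [""]
      let lines := lines ++ [report]
      let lines := lines ++ [""]
      let lines := lines ++ ["</details>"]
      let lines := lines ++ [""]
      if i < (analyses.length : Int) - 1 then lines ++ ["---"] ++ [""] else lines)
    []

-- ===== PORT B =====
-- B's per-section block (Source B's inner list literal).
def pvAltBlock (entry : List (String × String)) (budget report target : String) : List String :=
  ["### " ++ (List.lookup "label" entry).getD "" ++ " | " ++ target, "",
   "**CPU Utilization Budget**", "", budget, "",
   "<details>", "<summary>Click to expand full details</summary>", "",
   report, "", "</details>", ""]

def build_collapsible_sections_py_alt (analyses : List (List (String × String))) (budgets : List String) (reports : List String) (target : String) : List String :=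
  let sections := (analyses.zip (budgets.zip reports)).map
    (fun x => pvAltBlock x.1 x.2.1 x.2.2 target)
  match sections with
  | [] => []
  | first :: rest => first ++ rest.flatMap (fun block => ["---", ""] ++ block)

-- ===== PRECONDITION & SPEC =====
-- Pre_ excludes exactly the inputs where A raises KeyError: some zipped entry lacks a
-- "label" key.  (B raises there too.)
def Pre_build_collapsible_sections_py (analyses : List (List (String × String))) (budgets : List String) (reports : List String) (target : String) : Prop :=
  ((analyses.take (min budgets.length reports.length)).all
    (fun entry => (List.lookup "label" entry).isSome)) = true
instance (analyses : List (List (String × String))) (budgets : List String) (reports : List String) (target : String) : Decidable (Pre_build_collapsible_sections_py analyses budgets reports target) := by unfold Pre_build_collapsible_sections_py; infer_instance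

def pvWitness_build_collapsible_sections_py : (List (List (String × String))) × List String × List String × String :=
  ([[("label", "app")], [("label", "boot")]], ["ok", "ok"], ["r1", "r2"], "stm32")

-- When analyses is longer than the rendered zip (1 ≤ min(|budgets|, |reports|) < |analyses|),
-- A's `i < len(analyses)-1` test uses the wrong length and appends a dangling trailing
-- '---','' separator; B emits separators only between sections, the intended Markdown layout.
def D_build_collapsible_sections_py (analyses : List (List (String × String))) (budgets : List String) (reports : List String) (target : String) : Prop :=
  1 ≤ min budgets.length reports.length ∧ min budgets.length reports.length < analyses.length
instance (analyses : List (List (String × String))) (budgets : List String) (reports : List String) (target : String) : Decidable (D_build_collapsible_sections_py analyses budgets reports target) := by unfold D_build_collapsible_sections_py; infer_instance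

def Spec_build_collapsible_sections_py (analyses : List (List (String × String))) (budgets : List String) (reports : List String) (target : String) (out : List String) : Prop := ¬ D_build_collapsible_sections_py analyses budgets reports target → out = build_collapsible_sections_py_alt analyses budgets reports target
instance (analyses : List (List (String × String))) (budgets : List String) (reports : List String) (target : String) (out : List String) : Decidable (Spec_build_collapsible_sections_py analyses budgets reports target out) := by unfold Spec_build_collapsible_sections_py; infer_instance

def pvDiffWitness_build_collapsible_sections_py : (List (List (String × String))) × List String × List String × String :=
  ([[("label", "app")], [("label", "boot")]], ["ok"], ["r1"], "stm32")

def pvDiffWitnessOut_build_collapsible_sections_py : (List String) × (List String) :=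
  (["### app | stm32", "", "**CPU Utilization Budget**", "", "ok", "",
    "<details>", "<summary>Click to expand full details</summary>", "",
    "r1", "", "</details>", "", "---", ""],
   ["### app | stm32", "", "**CPU Utilization Budget**", "", "ok", "",
    "<details>", "<summary>Click to expand full details</summary>", "",
    "r1", "", "</details>", ""])

-- ===== CLAIM (what is proved, stated in full; the proofs are below) =====
def Claim_unchanged_build_collapsible_sections_py : Prop := ∀ (analyses : List (List (String × String))) (budgets : List String) (reports : List String) (target : String), Dom_build_collapsible_sections_py analyses budgets reports target → Pre_build_collapsible_sections_py analyses budgets reports target → Spec_build_collapsible_sections_py analyses budgets reports target (build_collapsible_sections_py analyses budgets reports target)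
def Claim_changed_build_collapsible_sections_py : Prop := Dom_build_collapsible_sections_py (pvDiffWitness_build_collapsible_sections_py.1) (pvDiffWitness_build_collapsible_sections_py.2.1) (pvDiffWitness_build_collapsible_sections_py.2.2.1) (pvDiffWitness_build_collapsible_sections_py.2.2.2) ∧ Pre_build_collapsible_sections_py (pvDiffWitness_build_collapsible_sections_py.1) (pvDiffWitness_build_collapsible_sections_py.2.1) (pvDiffWitness_build_collapsible_sections_py.2.2.1) (pvDiffWitness_build_collapsible_sections_py.2.2.2) ∧ D_build_collapsible_sections_py (pvDiffWitness_build_collapsible_sections_py.1) (pvDiffWitness_build_collapsible_sections_py.2.1) (pvDiffWitness_build_collapsible_sections_py.2.2.1) (pvDiffWitness_build_collapsible_sections_py.2.2.2) ∧ build_collapsible_sections_py (pvDiffWitness_build_collapsible_sections_py.1) (pvDiffWitness_build_collapsible_sections_py.2.1) (pvDiffWitness_build_collapsible_sections_py.2.2.1) (pvDiffWitness_build_collapsible_sections_py.2.2.2) = pvDiffWitnessOut_build_collapsible_sections_py.1 ∧ build_collapsible_sections_py_alt (pvDiffWitness_build_collapsible_sections_py.1) (pvDiffWitness_build_collapsible_sections_py.2.1)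 (pvDiffWitness_build_collapsible_sections_py.2.2.1) (pvDiffWitness_build_collapsible_sections_py.2.2.2) = pvDiffWitnessOut_build_collapsible_sections_py.2 ∧ pvDiffWitnessOut_build_collapsible_sections_py.1 ≠ pvDiffWitnessOut_build_collapsible_sections_py.2
def Claim_exact_build_collapsible_sections_py : Prop := ∀ (analyses : List (List (String × String))) (budgets : List String) (reports : List String) (target : String), Dom_build_collapsible_sections_py analyses budgets reports target → Pre_build_collapsible_sections_py analyses budgets reports target → D_build_collapsible_sections_py analyses budgets reports target → build_collapsible_sections_py analyses budgets reports target ≠ build_collapsible_sections_py_alt analyses budgets reports target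

-- ===== LEMMAS AND PROOFS =====

-- A's foldl rephrased as a flatMap over the enumerated zip.
theorem pvA_flatMap (analyses : List (List (String × String))) (budgets : List String)
    (reports : List String) (target : String) :
    build_collapsible_sections_py analyses budgets reports target
      = (PySem.List.enumerate (analyses.zip (budgets.zip reports)) 0).flatMap
          (fun x => pvAltBlock x.2.1 x.2.2.1 x.2.2.2 target
            ++ if x.1 < (analyses.length : Int) - 1 then ["---", ""] else []) := by
  unfold build_collapsible_sections_py
  rw [List.foldl_ext _
      (fun (lines : List String) (x : Int × (List (String × String)) × String × String) =>
        lines ++ (pvAltBlock x.2.1 x.2.2.1 x.2.2.2 target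
          ++ if x.1 < (analyses.length : Int) - 1 then ["---", ""] else [])) []
      (fun lines x _ => by
        by_cases h : x.1 < (analyses.length : Int) - 1 <;>
          simp [h, pvAltBlock, List.append_assoc]),
    PySem.List.foldl_append_eq_flatMap, List.nil_append]

-- When the look-ahead bound is exactly the last index, the flatMap is the
-- separator-interposed join of the per-element blocks.
theorem pv_flatMap_interpose {α : Type} (f : α → List String) (sep : List String)
    (l : List α) (s M : Int) (h : M = s + l.length - 1) :
    (PySem.List.enumerate l s).flatMap (fun x => f x.2 ++ if x.1 < M then sep else [])
      = match l.map f with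
        | [] => []
        | first :: rest => first ++ rest.flatMap (fun b => sep ++ b) := by
  induction l generalizing s with
  | nil => simp [PySem.List.enumerate_nil]
  | cons a l ih =>
    rw [PySem.List.enumerate_cons]
    simp only [List.flatMap_cons, List.map_cons, List.length_cons] at *
    cases l with
    | nil =>
      have hs : ¬ s < M := by simp at h; omega
      simp [PySem.List.enumerate_nil, hs]
    | cons b l' =>
      have hs : s < M := by simp at h; omega
      rw [ih (s + 1) (by simp at h ⊢; omega)]
      simp [hs, List.append_assoc]

-- When the bound exceeds every index, every element gets a separator.
theorem pv_flatMap_allsep {α : Type} (f : α → List String) (sep : List String)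
    (l : List α) (s M : Int) (h : s + l.length ≤ M) :
    (PySem.List.enumerate l s).flatMap (fun x => f x.2 ++ if x.1 < M then sep else [])
      = l.flatMap (fun y => f y ++ sep) := by
  induction l generalizing s with
  | nil => simp [PySem.List.enumerate_nil]
  | cons a l ih =>
    rw [PySem.List.enumerate_cons]
    have hs : s < M := by simp at h; omega
    rw [List.flatMap_cons, List.flatMap_cons, ih (s + 1) (by simp at h ⊢; omega)]
    simp [hs]

theorem pvAltBlock_length (entry : List (String × String)) (budget report target : String) :
    (pvAltBlock entry budget report target).length = 13 := by
  simp [pvAltBlock]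

-- ===== VERDICT (by name: the statements are the Claim_ definitions above) =====
theorem build_collapsible_sections_py_spec : Claim_unchanged_build_collapsible_sections_py := by
  intro analyses budgets reports target _ _ hD
  unfold D_build_collapsible_sections_py at hD
  push Not at hD
  rw [pvA_flatMap]
  by_cases h0 : 1 ≤ min budgets.length reports.length
  · have hge : analyses.length ≤ min budgets.length reports.length := hD h0
    have hlen : (analyses.zip (budgets.zip reports)).length = analyses.length := by
      rw [List.length_zip, List.length_zip]; omega
    have hcut := pv_flatMap_interpose
      (f := fun t : (List (String × String)) × String × String => pvAltBlock t.1 t.2.1 t.2.2 target)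
      (sep := ["---", ""]) (l := analyses.zip (budgets.zip reports))
      (s := 0) (M := (analyses.length : Int) - 1) (by rw [hlen]; omega)
    beta_reduce at hcut
    rw [hcut]
    rfl
  · have hz : (analyses.zip (budgets.zip reports)).length = 0 := by
      rw [List.length_zip, List.length_zip]; omega
    rw [List.length_eq_zero_iff] at hz
    simp [build_collapsible_sections_py_alt, hz, PySem.List.enumerate_nil]

theorem build_collapsible_sections_py_changed : Claim_changed_build_collapsible_sections_py := by
  unfold Claim_changed_build_collapsible_sections_py; decide

theorem build_collapsible_sections_py_tight : Claim_exact_build_collapsible_sections_py := by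
  intro analyses budgets reports target _ _ hD heq
  obtain ⟨h1, h2⟩ := hD
  have hlen : (analyses.zip (budgets.zip reports)).length = min budgets.length reports.length := by
    rw [List.length_zip, List.length_zip]; omega
  have hA := pvA_flatMap analyses budgets reports target
  have hall := pv_flatMap_allsep
    (f := fun t : (List (String × String)) × String × String => pvAltBlock t.1 t.2.1 t.2.2 target)
    (sep := ["---", ""]) (l := analyses.zip (budgets.zip reports))
    (s := 0) (M := (analyses.length : Int) - 1) (by rw [hlen]; omega)
  beta_reduce at hall
  rw [hall] at hA
  -- lengths: A has 15 lines per rendered section, B has 15 per section minus the last 2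
  have hAlen : (build_collapsible_sections_py analyses budgets reports target).length
      = 15 * (analyses.zip (budgets.zip reports)).length := by
    rw [hA, List.length_flatMap]
    have hmap : ((analyses.zip (budgets.zip reports)).map
        (fun x => (pvAltBlock x.1 x.2.1 x.2.2 target ++ ["---", ""]).length))
        = (analyses.zip (budgets.zip reports)).map (fun _ => 15) :=
      List.map_congr_left (fun x _ => by rw [List.length_append, pvAltBlock_length]; rfl)
    rw [hmap, List.map_const', List.sum_replicate, smul_eq_mul]
    omega
  have hBlen : (build_collapsible_sections_py_alt analyses budgets reports target).length
      = 15 * (analyses.zip (budgets.zip reports)).length - 2 := by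
    unfold build_collapsible_sections_py_alt
    cases hzl : analyses.zip (budgets.zip reports) with
    | nil => rw [hzl] at hlen; simp at hlen; omega
    | cons a l =>
      show (pvAltBlock a.1 a.2.1 a.2.2 target
        ++ (l.map (fun x => pvAltBlock x.1 x.2.1 x.2.2 target)).flatMap
            (fun block => ["---", ""] ++ block)).length = _
      rw [List.length_append, List.length_flatMap, pvAltBlock_length, List.map_map]
      have hmap : (l.map ((fun block => (["---", ""] ++ block).length)
            ∘ fun x => pvAltBlock x.1 x.2.1 x.2.2 target))
          = l.map (fun _ => 15) :=
        List.map_congr_left (fun x _ => by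
          simp only [Function.comp_def, List.length_append, pvAltBlock_length]; rfl)
      rw [hmap, List.map_const', List.sum_replicate, smul_eq_mul, List.length_cons]
      omega
  have hpos : 1 ≤ (analyses.zip (budgets.zip reports)).length := by omega
  rw [heq, hBlen] at hAlen
  omega
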